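-- pv_equiv track=rewrite | github.com/core-stack-org/core-stack-backend | installation/public_api_client.py | summary_for_active_locations
-- ===== SOURCE A (Python) =====
-- from typing import Any
--
-- def summary_for_active_locations(active_locations: list[dict[str, Any]]) -> dict[str, Any]:
--     states = len(active_locations)
--     districts = sum(len(state.get("district", [])) for state in active_locations)
--     tehsils = sum(
--         len(district.get("blocks", []))
--         for state in active_locations
--         for district in state.get("district", [])
--     )
--     return {
--         "states": states,
--         "districts": districts,
--         "tehsils": tehsils,
--     }
-- ===== SOURCE B (Python) =====
-- def summary_for_active_locations(active_locations):
--     states = len(active_locations)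
--     districts = 0
--     tehsils = 0
--     # worklist traversal of the nested structure with an explicit stack
--     stack = [("state", s) for s in active_locations]
--     while stack:
--         kind, node = stack.pop()
--         if kind == "state":
--             for d in node.get("district", []):
--                 districts += 1
--                 stack.append(("district", d))
--         else:
--             tehsils += len(node.get("blocks", []))
--     return {"states": states, "districts": districts, "tehsils": tehsils}
-- ===== Notes on version B (the rewrite author's own statement) =====
-- stated objective: alternative
-- what changed: Replaces the three generator-expression aggregations with an explicit-stack worklist traversal of the nested structure: nodes tagged state/district are pushed and popped from a stack, districts counted as they are pushed and tehsils as district nodes are popped (order-independent counting).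
import Mathlib
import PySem

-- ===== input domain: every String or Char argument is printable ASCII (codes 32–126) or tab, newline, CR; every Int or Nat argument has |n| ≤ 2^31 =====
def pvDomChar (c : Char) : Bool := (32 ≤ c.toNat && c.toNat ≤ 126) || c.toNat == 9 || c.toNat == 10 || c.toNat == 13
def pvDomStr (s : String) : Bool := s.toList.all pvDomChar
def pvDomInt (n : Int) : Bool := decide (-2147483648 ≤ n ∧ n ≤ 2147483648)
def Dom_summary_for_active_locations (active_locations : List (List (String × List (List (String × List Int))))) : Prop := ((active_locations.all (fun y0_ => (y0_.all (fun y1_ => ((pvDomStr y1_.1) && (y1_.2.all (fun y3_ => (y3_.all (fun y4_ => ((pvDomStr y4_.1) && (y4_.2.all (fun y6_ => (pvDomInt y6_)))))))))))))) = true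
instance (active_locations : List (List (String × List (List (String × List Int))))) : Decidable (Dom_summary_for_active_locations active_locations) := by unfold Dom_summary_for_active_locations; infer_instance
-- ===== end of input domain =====

-- B replaces A's three staged aggregations by an explicit-stack worklist traversal (alternative decomposition; same cost).

-- ===== PORT A =====
-- states = len(...); districts = sum(len(state.get("district", [])) ...); tehsils = nested sum
def summary_for_active_locations (active_locations : List (List (String × List (List (String × List Int))))) : List (String × Int) :=
  let states : Int := active_locations.length
  let districts : Int := active_locations.foldl
    (fun acc state => acc + ((PySem.Dict.mk state).getD "district" []).length) 0
  let tehsils : Int := active_locations.foldl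
    (fun acc state =>
      ((PySem.Dict.mk state).getD "district" []).foldl
        (fun acc2 district => acc2 + ((PySem.Dict.mk district).getD "blocks" []).length) acc) 0
  [("states", states), ("districts", districts), ("tehsils", tehsils)]

-- ===== PORT B =====
-- python's stack is a list popped from the end; the Lean list's HEAD models the top of the
-- stack, so python's 'append x' is 'x :: stack' and appending dl in order puts dl.reverse on top.
-- A node ("state", s) is Sum.inl s, ("district", d) is Sum.inr d.
-- weight of a stack node, used only as the termination measure of the while loop
def pvNodeW : (List (String × List (List (String × List Int)))) ⊕ (List (String × List Int)) → Nat
  | Sum.inl s => 1 + ((PySem.Dict.mk s).getD "district" []).length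
  | Sum.inr _ => 1

-- the while loop: pop a node, dispatch on its tag, update the districts/tehsils accumulators
def pvLoop : List ((List (String × List (List (String × List Int)))) ⊕ (List (String × List Int))) → Int → Int → Int × Int
  | [], districts, tehsils => (districts, tehsils)
  | (Sum.inl s) :: rest, districts, tehsils =>
      let dl := (PySem.Dict.mk s).getD "district" []
      pvLoop ((dl.reverse.map Sum.inr) ++ rest) (districts + dl.length) tehsils
  | (Sum.inr d) :: rest, districts, tehsils =>
      pvLoop rest districts (tehsils + ((PySem.Dict.mk d).getD "blocks" []).length)
termination_by stack _ _ => (stack.map pvNodeW).sum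
decreasing_by
  · simp only [List.map_append, List.sum_append, List.map_map, List.map_reverse, List.sum_reverse,
      List.map_cons, List.sum_cons, Function.comp_def, pvNodeW]
    simp only [List.map_const', List.sum_replicate, smul_eq_mul, mul_one]
    omega
  · simp [pvNodeW]

def summary_for_active_locations_alt (active_locations : List (List (String × List (List (String × List Int))))) : List (String × Int) :=
  let states : Int := active_locations.length
  let dt := pvLoop (active_locations.reverse.map Sum.inl) 0 0
  [("states", states), ("districts", dt.1), ("tehsils", dt.2)]

-- ===== PRECONDITION & SPEC =====
def Spec_summary_for_active_locations (active_locations : List (List (String × List (List (String × List Int))))) (out : List (String × Int)) : Prop := out = summary_for_active_locations_alt active_locations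
instance (active_locations : List (List (String × List (List (String × List Int))))) (out : List (String × Int)) : Decidable (Spec_summary_for_active_locations active_locations out) := by unfold Spec_summary_for_active_locations; infer_instance

-- ===== CLAIM (what is proved, stated in full; the proofs are below) =====
def Claim_equal_summary_for_active_locations : Prop := ∀ (active_locations : List (List (String × List (List (String × List Int))))), Dom_summary_for_active_locations active_locations → Spec_summary_for_active_locations active_locations (summary_for_active_locations active_locations)

-- ===== LEMMAS AND PROOFS =====

-- per-node contribution to the districts count
def pvFD : (List (String × List (List (String × List Int)))) ⊕ (List (String × List Int)) → Int
  | Sum.inl s => ((PySem.Dict.mk s).getD "district" []).length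
  | Sum.inr _ => 0

-- per-node contribution to the tehsils count
def pvFT : (List (String × List (List (String × List Int)))) ⊕ (List (String × List Int)) → Int
  | Sum.inl s => (((PySem.Dict.mk s).getD "district" []).map
      (fun d => (((PySem.Dict.mk d).getD "blocks" []).length : Int))).sum
  | Sum.inr d => ((PySem.Dict.mk d).getD "blocks" []).length

-- the worklist loop adds each stack node's contributions to the accumulators
theorem pvLoop_eq : ∀ (stack : List ((List (String × List (List (String × List Int)))) ⊕ (List (String × List Int)))) (d t : Int),
    pvLoop stack d t = (d + (stack.map pvFD).sum, t + (stack.map pvFT).sum) := by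
  intro stack d t
  induction stack, d, t using pvLoop.induct with
  | case1 d t => simp [pvLoop]
  | case2 s rest d t dl ih =>
      rw [pvLoop]
      rw [ih]
      simp [pvFD, pvFT, Function.comp_def, List.map_append, List.sum_append, List.map_map,
        List.map_reverse, List.sum_reverse, List.map_const', List.sum_replicate]
      exact ⟨by ring, rfl⟩
  | case3 dd rest d t ih =>
      rw [pvLoop, ih]
      simp [pvFD, pvFT]
      ring_nf

-- A's foldls are the same sums
theorem pvA_districts (al : List (List (String × List (List (String × List Int))))) (a : Int) :
    al.foldl (fun (acc : Int) state => acc + ((PySem.Dict.mk state).getD "district" []).length) a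
      = a + (al.map (fun s => pvFD (Sum.inl s))).sum := by
  induction al generalizing a with
  | nil => simp
  | cons s rest ih => simp [List.foldl_cons, ih, pvFD]; ring

theorem pvA_tehsils (al : List (List (String × List (List (String × List Int))))) (a : Int) :
    al.foldl (fun (acc : Int) state =>
        ((PySem.Dict.mk state).getD "district" []).foldl
          (fun acc2 district => acc2 + ((PySem.Dict.mk district).getD "blocks" []).length) acc) a
      = a + (al.map (fun s => pvFT (Sum.inl s))).sum := by
  induction al generalizing a with
  | nil => simp
  | cons s rest ih =>
      simp only [List.foldl_cons, ih]
      rw [PySem.List.foldl_add (g := fun d => (((PySem.Dict.mk d).getD "blocks" []).length : Int))]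
      simp [pvFT]
      ring

-- ===== VERDICT (by name: the statement is the Claim_ definition above) =====
theorem summary_for_active_locations_spec : Claim_equal_summary_for_active_locations := by
  intro al _
  unfold Spec_summary_for_active_locations summary_for_active_locations summary_for_active_locations_alt
  rw [pvLoop_eq, pvA_districts, pvA_tehsils]
  simp [List.map_reverse, List.sum_reverse, List.map_map, Function.comp_def]
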